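-- pv_equiv track=rewrite | github.com/HorizonWork/DroneDelivery-RL | DroneDelivery-RL/src/planning/global_planner/astar_planner.py | _count_floor_transitions
-- ===== SOURCE A (Python) =====
-- from typing import Dict, List, Tuple, Optional, Any, Set
--
-- def _count_floor_transitions(grid_path: List[Tuple[int, int, int]]) -> int:
--     """
--     Count number of floor transitions in path.
--
--     Args:
--         grid_path: Path in grid coordinates
--
--     Returns:
--         Number of floor transitions
--     """
--     if len(grid_path) < 2:
--         return 0
--
--     transitions = 0
--     current_floor = grid_path[0][2]
--
--     for _, _, z in grid_path[1:]:
--         if z != current_floor: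
--             transitions += 1
--             current_floor = z
--
--     return transitions
-- ===== SOURCE B (Python) =====
-- from typing import List, Tuple
--
--
-- def _count_floor_transitions(grid_path: List[Tuple[int, int, int]]) -> int:
--     zs = [z for _, _, z in grid_path]
--     return _rec(zs)
--
--
-- def _rec(zs: List[int]) -> int:
--     # divide and conquer: transitions in zs = transitions in each half
--     # plus one if the floor changes across the split boundary
--     if len(zs) < 2:
--         return 0
--     mid = len(zs) // 2
--     left, right = zs[:mid], zs[mid:]
--     boundary = 1 if left[-1] != right[0] else 0
--     return _rec(left) + _rec(right) + boundary
-- ===== Notes on version B (the rewrite author's own statement) =====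
-- stated objective: alternative
-- what changed: Replaces A's single stateful left-to-right scan with a divide-and-conquer recursion: split the floor sequence in half, count transitions in each half recursively, and add one if the floor changes across the split boundary.
import Mathlib
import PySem

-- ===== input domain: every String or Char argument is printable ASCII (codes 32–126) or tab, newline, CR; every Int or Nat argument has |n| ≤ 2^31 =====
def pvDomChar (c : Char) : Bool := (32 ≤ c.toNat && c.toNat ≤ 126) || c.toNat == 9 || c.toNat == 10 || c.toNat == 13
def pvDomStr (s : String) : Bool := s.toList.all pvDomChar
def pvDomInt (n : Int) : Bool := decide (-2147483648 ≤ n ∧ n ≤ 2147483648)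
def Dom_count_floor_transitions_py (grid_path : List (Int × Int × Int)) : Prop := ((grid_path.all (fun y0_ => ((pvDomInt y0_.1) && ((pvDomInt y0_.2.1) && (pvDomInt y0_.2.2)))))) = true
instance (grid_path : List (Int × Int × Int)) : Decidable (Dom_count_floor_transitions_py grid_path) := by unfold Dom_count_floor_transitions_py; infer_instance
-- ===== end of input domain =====

-- B replaces A's stateful left-to-right scan with a divide-and-conquer recursion on
-- the floor sequence (count each half, plus one for a change at the split boundary); alternative decomposition.

-- ===== PORT A =====
-- the for-loop over grid_path[1:] with state (current_floor, transitions)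
def ctALoop : List (Int × Int × Int) → Int → Int → Int
  | [], _, transitions => transitions
  | (_, _, z) :: rest, current_floor, transitions =>
      if z ≠ current_floor then ctALoop rest z (transitions + 1)
      else ctALoop rest current_floor transitions

def count_floor_transitions_py (grid_path : List (Int × Int × Int)) : Int :=
  if grid_path.length < 2 then 0
  else
    match grid_path with
    | [] => 0
    | p :: rest => ctALoop rest p.2.2 0   -- current_floor = grid_path[0][2], loop over grid_path[1:]

-- ===== PORT B =====
-- _rec of Source B: zs[:mid] / zs[mid:] as PySem slices, left[-1] / right[0] as pyGet?
def ctBRec (zs : List Int) : Int :=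
  if zs.length < 2 then 0
  else
    let mid : Nat := zs.length / 2          -- len(zs) // 2 (len ≥ 0, so Nat division is exact)
    let left := PySem.List.slice zs none (some (mid : Int))
    let right := PySem.List.slice zs (some (mid : Int)) none
    let boundary : Int :=
      if PySem.List.pyGet? left (-1) ≠ PySem.List.pyGet? right 0 then 1 else 0
    ctBRec left + ctBRec right + boundary
termination_by zs.length
decreasing_by
  · simp only [PySem.List.slice_to_natCast, List.length_take]; omega
  · simp only [PySem.List.slice_from_natCast, List.length_drop]; omega

def count_floor_transitions_py_alt (grid_path : List (Int × Int × Int)) : Int :=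
  ctBRec (grid_path.map (fun p => p.2.2))

-- ===== PRECONDITION & SPEC =====
def Spec_count_floor_transitions_py (grid_path : List (Int × Int × Int)) (out : Int) : Prop := out = count_floor_transitions_py_alt grid_path
instance (grid_path : List (Int × Int × Int)) (out : Int) : Decidable (Spec_count_floor_transitions_py grid_path out) := by unfold Spec_count_floor_transitions_py; infer_instance

-- ===== CLAIM =====
def Claim_equal_count_floor_transitions_py : Prop := ∀ (grid_path : List (Int × Int × Int)), Dom_count_floor_transitions_py grid_path → Spec_count_floor_transitions_py grid_path (count_floor_transitions_py grid_path)

-- ===== LEMMAS AND PROOFS =====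

-- reference function: number of adjacent unequal pairs
def pairT : List Int → Int
  | x :: y :: rest => (if y ≠ x then 1 else 0) + pairT (y :: rest)
  | _ => 0

theorem ctALoop_eq_pairT (l : List (Int × Int × Int)) :
    ∀ (c t : Int), ctALoop l c t = t + pairT (c :: l.map (fun p => p.2.2)) := by
  induction l with
  | nil => intro c t; simp [ctALoop, pairT]
  | cons p rest ih =>
    intro c t
    obtain ⟨a, b, z⟩ := p
    by_cases hz : z = c
    · subst hz; simp [ctALoop, pairT, ih]
    · simp only [ctALoop, hz, ne_eq, not_false_eq_true, if_true, ih, List.map_cons, pairT]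
      ring

theorem pairT_append (l r : List Int) (hl : l ≠ []) (hr : r ≠ []) :
    pairT (l ++ r) = pairT l + pairT r +
      (if l.getLast? ≠ r.head? then 1 else 0) := by
  induction l with
  | nil => simp at hl
  | cons x l ih =>
    cases l with
    | nil =>
      cases r with
      | nil => simp at hr
      | cons y r' =>
        have h1 : pairT ([x] ++ y :: r') = (if y ≠ x then 1 else 0) + pairT (y :: r') := rfl
        have h2 : pairT [x] = 0 := rfl
        have h3 : (([x] : List Int).getLast? ≠ (y :: r').head?) ↔ (y ≠ x) := by
          simp [eq_comm]
        rw [h1, h2]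
        by_cases h : y = x
        · rw [if_neg (by simp [h]), if_neg (fun hc => (h3.mp hc) h)]
          ring
        · rw [if_pos h, if_pos (h3.mpr h)]
          ring
    | cons a l' =>
      have ih' := ih (by simp)
      rw [List.cons_append] at ih'
      have h1 : pairT (x :: a :: (l' ++ r)) = (if a ≠ x then 1 else 0) + pairT (a :: (l' ++ r)) := rfl
      have h2 : pairT (x :: a :: l') = (if a ≠ x then 1 else 0) + pairT (a :: l') := rfl
      have hgl : (x :: a :: l').getLast? = (a :: l').getLast? := by
        simp [List.getLast?_cons_cons]
      calc pairT (x :: a :: l' ++ r)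
          = (if a ≠ x then 1 else 0) + pairT (a :: (l' ++ r)) := h1
        _ = (if a ≠ x then 1 else 0) + (pairT (a :: l') + pairT r +
              (if (a :: l').getLast? ≠ r.head? then 1 else 0)) := by rw [ih']
        _ = pairT (x :: a :: l') + pairT r +
              (if (x :: a :: l').getLast? ≠ r.head? then 1 else 0) := by rw [h2, hgl]; ring

theorem pairT_short (zs : List Int) (h : zs.length < 2) : pairT zs = 0 := by
  match zs with
  | [] => rfl
  | [x] => rfl
  | x :: y :: rest => simp at h

theorem ctBRec_eq_pairT (zs : List Int) : ctBRec zs = pairT zs := by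
  have H : ∀ (n : Nat) (zs : List Int), zs.length ≤ n → ctBRec zs = pairT zs := by
    intro n
    induction n with
    | zero =>
      intro zs h
      rw [ctBRec]
      have : zs.length < 2 := by omega
      rw [if_pos this, pairT_short zs this]
    | succ n ih =>
      intro zs h
      rw [ctBRec]
      by_cases hlen : zs.length < 2
      · rw [if_pos hlen, pairT_short zs hlen]
      · rw [if_neg hlen]
        have hmid1 : 1 ≤ zs.length / 2 := by omega
        have hmid2 : zs.length / 2 < zs.length := by omega
        simp only [PySem.List.slice_to_natCast, PySem.List.slice_from_natCast]
        set mid := zs.length / 2 with hm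
        have hL : (zs.take mid).length ≤ n := by rw [List.length_take]; omega
        have hR : (zs.drop mid).length ≤ n := by rw [List.length_drop]; omega
        rw [ih _ hL, ih _ hR]
        have hLne : zs.take mid ≠ [] := by
          intro h0
          have h1 : (zs.take mid).length = 0 := by rw [h0]; rfl
          rw [List.length_take] at h1; omega
        have hRne : zs.drop mid ≠ [] := by
          intro h0
          have h1 : (zs.drop mid).length = 0 := by rw [h0]; rfl
          rw [List.length_drop] at h1; omega
        have hsplit : zs = zs.take mid ++ zs.drop mid := (List.take_append_drop mid zs).symm
        rw [PySem.List.pyGet?_neg_one, PySem.List.pyGet?_zero]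
        conv_rhs => rw [hsplit]
        rw [pairT_append _ _ hLne hRne]
        have : (zs.drop mid).head? = (zs.drop mid)[0]? := by
          cases zs.drop mid <;> simp
        rw [this]
  exact H zs.length zs (le_refl _)

-- ===== VERDICT =====
theorem count_floor_transitions_py_spec : Claim_equal_count_floor_transitions_py := by
  intro grid_path _
  unfold Spec_count_floor_transitions_py count_floor_transitions_py count_floor_transitions_py_alt
  rw [ctBRec_eq_pairT]
  by_cases h : grid_path.length < 2
  · rw [if_pos h]
    exact (pairT_short _ (by simpa using h)).symm
  · rw [if_neg h]
    match grid_path with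
    | [] => simp at h
    | p :: rest =>
      show ctALoop rest p.2.2 0 = pairT ((p :: rest).map (fun p => p.2.2))
      rw [ctALoop_eq_pairT rest p.2.2 0, List.map_cons]
      ring
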